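-- pv_equiv track=rewrite | github.com/Alaflipo/mooey_thesis | elements/group.py | generate_circle_sequence
-- ===== SOURCE A (Python) =====
-- def generate_circle_sequence(length):
--     # the port sequence of the first 8 nodes
--     base_seq = [
--         [4,1,7],
--         [4,6,0,2],
--         [4,5,7,1,3],
--         [4,5,7,0,1,3],
--         [4,5,6,7,1,2,3],
--         [4,5,6,7,0,1,2,3],
--     ]
--     if length <= 8:
--         return base_seq[length - 3]
--
--     # from here there is a logical sequence to follow
--     base = base_seq[5]
--     dup_order = [4, 0, 6, 2, 5, 1, 7, 3]
--
--     seq = base.copy()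
--     i = 0
--
--     while len(seq) < length:
--         val = dup_order[i % len(dup_order)]
--         idx = seq.index(val)
--         seq.insert(idx, val)
--         i += 1
--
--     return seq[:length]
-- ===== SOURCE B (Python) =====
-- def generate_circle_sequence(length):
--     # the port sequence of the first 8 nodes
--     base_seq = [
--         [4,1,7],
--         [4,6,0,2],
--         [4,5,7,1,3],
--         [4,5,7,0,1,3],
--         [4,5,6,7,1,2,3],
--         [4,5,6,7,0,1,2,3],
--     ]
--     if length <= 8:
--         return base_seq[length - 3]
--
--     # each insertion duplicates the next value of dup_order round-robin and the
--     # copies stay contiguous, so emit each value's run directly from arithmetic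
--     k = length - 8
--     dup_pos = {4: 0, 0: 1, 6: 2, 2: 3, 5: 4, 1: 5, 7: 6, 3: 7}
--     out = []
--     for val in [4, 5, 6, 7, 0, 1, 2, 3]:
--         out.extend([val] * (1 + (k + 7 - dup_pos[val]) // 8))
--     return out
-- ===== Notes on version B (the rewrite author's own statement) =====
-- stated objective: faster
-- what changed: Replaces the quadratic loop of list.index + list.insert by closed-form per-value duplication counts from the round-robin order, emitting each value's contiguous run in one pass.
-- outside the precondition, e.g. on generate_circle_sequence(-4): A raises IndexError, B raises IndexError
import Mathlib
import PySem

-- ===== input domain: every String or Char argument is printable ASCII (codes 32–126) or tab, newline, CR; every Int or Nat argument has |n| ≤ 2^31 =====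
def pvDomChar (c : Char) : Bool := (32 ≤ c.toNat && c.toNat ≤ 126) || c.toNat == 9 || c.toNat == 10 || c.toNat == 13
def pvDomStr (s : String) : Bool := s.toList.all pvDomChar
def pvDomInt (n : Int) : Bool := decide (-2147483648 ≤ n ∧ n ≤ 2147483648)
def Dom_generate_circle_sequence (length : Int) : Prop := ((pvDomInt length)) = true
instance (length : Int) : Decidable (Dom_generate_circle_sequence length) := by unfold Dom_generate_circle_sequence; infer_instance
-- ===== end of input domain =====

-- B replaces A's quadratic index+insert loop by closed-form per-value run counts (objective: faster).

-- ===== PORT A =====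
def pvBaseSeq : List (List Int) :=
  [[4,1,7], [4,6,0,2], [4,5,7,1,3], [4,5,7,0,1,3], [4,5,6,7,1,2,3], [4,5,6,7,0,1,2,3]]

def pvDupOrder : List Int := [4, 0, 6, 2, 5, 1, 7, 3]

-- the while loop of A: while len(seq) < length: duplicate dup_order[i % 8] before its first occurrence
def pvALoop (length : Int) (seq : List Int) (i : Nat) : List Int :=
  if h : (seq.length : Int) < length then
    pvALoop length
      (PySem.List.insert seq
        (((PySem.List.index? seq
            ((PySem.List.pyGet? pvDupOrder ((i % pvDupOrder.length : Nat) : Int)).getD 0)).getD 0 : Nat) : Int)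
        ((PySem.List.pyGet? pvDupOrder ((i % pvDupOrder.length : Nat) : Int)).getD 0))
      (i + 1)
  else seq
termination_by (length - seq.length).toNat
decreasing_by
  simp [PySem.List.length_insert]
  omega

def generate_circle_sequence (length : Int) : List Int :=
  if length ≤ 8 then (PySem.List.pyGet? pvBaseSeq (length - 3)).getD []
  else
    PySem.List.slice (pvALoop length ((PySem.List.pyGet? pvBaseSeq 5).getD []) 0) none (some length)

-- ===== PORT B =====
def pvBaseSeqB : List (List Int) :=
  [[4,1,7], [4,6,0,2], [4,5,7,1,3], [4,5,7,0,1,3], [4,5,6,7,1,2,3], [4,5,6,7,0,1,2,3]]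

def pvDupPos : PySem.Dict Int Int :=
  PySem.Dict.ofList [(4,0), (0,1), (6,2), (2,3), (5,4), (1,5), (7,6), (3,7)]

def generate_circle_sequence_alt (length : Int) : List Int :=
  if length ≤ 8 then (PySem.List.pyGet? pvBaseSeqB (length - 3)).getD []
  else
    ([4, 5, 6, 7, 0, 1, 2, 3] : List Int).foldl
      (fun out val =>
        out ++ PySem.List.pyRepeat [val] (1 + PySem.Int.floordiv (length - 8 + 7 - pvDupPos.getD val 0) 8))
      []

-- ===== PRECONDITION & SPEC =====
-- Pre_ excludes length ≤ -4, where A raises IndexError (base_seq[length - 3] out of range).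
def Pre_generate_circle_sequence (length : Int) : Prop := -3 ≤ length
instance (length : Int) : Decidable (Pre_generate_circle_sequence length) := by
  unfold Pre_generate_circle_sequence; infer_instance

def pvWitness_generate_circle_sequence : Int := 12

def Spec_generate_circle_sequence (length : Int) (out : List Int) : Prop := out = generate_circle_sequence_alt length
instance (length : Int) (out : List Int) : Decidable (Spec_generate_circle_sequence length out) := by unfold Spec_generate_circle_sequence; infer_instance

-- ===== CLAIM (what is proved, stated in full; the proofs are below) =====
def Claim_equal_generate_circle_sequence : Prop := ∀ (length : Int), Dom_generate_circle_sequence length → Pre_generate_circle_sequence length → Spec_generate_circle_sequence length (generate_circle_sequence length)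

-- ===== LEMMAS AND PROOFS =====

-- count of copies of the value at dup_order position j after k insertions
def pvCnt (k j : Nat) : Nat := 1 + (k + 7 - j) / 8

-- the sequence after k insertions: contiguous runs in base order [4,5,6,7,0,1,2,3]
def pvModel (k : Nat) : List Int :=
  List.replicate (pvCnt k 0) 4 ++ List.replicate (pvCnt k 4) 5 ++
  List.replicate (pvCnt k 2) 6 ++ List.replicate (pvCnt k 6) 7 ++
  List.replicate (pvCnt k 1) 0 ++ List.replicate (pvCnt k 5) 1 ++
  List.replicate (pvCnt k 3) 2 ++ List.replicate (pvCnt k 7) 3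

lemma pvCnt_succ_self (k j : Nat) (hj : j < 8) (h : k % 8 = j) : pvCnt (k + 1) j = pvCnt k j + 1 := by
  unfold pvCnt; omega

lemma pvCnt_succ_ne (k j : Nat) (hj : j < 8) (h : k % 8 ≠ j) : pvCnt (k + 1) j = pvCnt k j := by
  unfold pvCnt; omega

lemma pvLenSum (k : Nat) : (pvModel k).length =
    pvCnt k 0 + pvCnt k 4 + pvCnt k 2 + pvCnt k 6 + pvCnt k 1 + pvCnt k 5 + pvCnt k 3 + pvCnt k 7 := by
  simp [pvModel]; omega

lemma pvModel_length (k : Nat) : (pvModel k).length = 8 + k := by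
  induction k with
  | zero => decide
  | succ k ih =>
      rw [pvLenSum] at ih ⊢
      rcases (by omega : k % 8 = 0 ∨ k % 8 = 1 ∨ k % 8 = 2 ∨ k % 8 = 3 ∨ k % 8 = 4 ∨
          k % 8 = 5 ∨ k % 8 = 6 ∨ k % 8 = 7) with hr | hr | hr | hr | hr | hr | hr | hr <;>
        [rw [pvCnt_succ_self k 0 (by omega) hr, pvCnt_succ_ne k 4 (by omega) (by omega), pvCnt_succ_ne k 2 (by omega) (by omega),
             pvCnt_succ_ne k 6 (by omega) (by omega), pvCnt_succ_ne k 1 (by omega) (by omega), pvCnt_succ_ne k 5 (by omega) (by omega),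
             pvCnt_succ_ne k 3 (by omega) (by omega), pvCnt_succ_ne k 7 (by omega) (by omega)];
         rw [pvCnt_succ_ne k 0 (by omega) (by omega), pvCnt_succ_ne k 4 (by omega) (by omega), pvCnt_succ_ne k 2 (by omega) (by omega),
             pvCnt_succ_ne k 6 (by omega) (by omega), pvCnt_succ_self k 1 (by omega) hr, pvCnt_succ_ne k 5 (by omega) (by omega),
             pvCnt_succ_ne k 3 (by omega) (by omega), pvCnt_succ_ne k 7 (by omega) (by omega)];
         rw [pvCnt_succ_ne k 0 (by omega) (by omega), pvCnt_succ_ne k 4 (by omega) (by omega), pvCnt_succ_self k 2 (by omega) hr,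
             pvCnt_succ_ne k 6 (by omega) (by omega), pvCnt_succ_ne k 1 (by omega) (by omega), pvCnt_succ_ne k 5 (by omega) (by omega),
             pvCnt_succ_ne k 3 (by omega) (by omega), pvCnt_succ_ne k 7 (by omega) (by omega)];
         rw [pvCnt_succ_ne k 0 (by omega) (by omega), pvCnt_succ_ne k 4 (by omega) (by omega), pvCnt_succ_ne k 2 (by omega) (by omega),
             pvCnt_succ_ne k 6 (by omega) (by omega), pvCnt_succ_ne k 1 (by omega) (by omega), pvCnt_succ_ne k 5 (by omega) (by omega),
             pvCnt_succ_self k 3 (by omega) hr, pvCnt_succ_ne k 7 (by omega) (by omega)];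
         rw [pvCnt_succ_ne k 0 (by omega) (by omega), pvCnt_succ_self k 4 (by omega) hr, pvCnt_succ_ne k 2 (by omega) (by omega),
             pvCnt_succ_ne k 6 (by omega) (by omega), pvCnt_succ_ne k 1 (by omega) (by omega), pvCnt_succ_ne k 5 (by omega) (by omega),
             pvCnt_succ_ne k 3 (by omega) (by omega), pvCnt_succ_ne k 7 (by omega) (by omega)];
         rw [pvCnt_succ_ne k 0 (by omega) (by omega), pvCnt_succ_ne k 4 (by omega) (by omega), pvCnt_succ_ne k 2 (by omega) (by omega),
             pvCnt_succ_ne k 6 (by omega) (by omega), pvCnt_succ_ne k 1 (by omega) (by omega), pvCnt_succ_self k 5 (by omega) hr,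
             pvCnt_succ_ne k 3 (by omega) (by omega), pvCnt_succ_ne k 7 (by omega) (by omega)];
         rw [pvCnt_succ_ne k 0 (by omega) (by omega), pvCnt_succ_ne k 4 (by omega) (by omega), pvCnt_succ_ne k 2 (by omega) (by omega),
             pvCnt_succ_self k 6 (by omega) hr, pvCnt_succ_ne k 1 (by omega) (by omega), pvCnt_succ_ne k 5 (by omega) (by omega),
             pvCnt_succ_ne k 3 (by omega) (by omega), pvCnt_succ_ne k 7 (by omega) (by omega)];
         rw [pvCnt_succ_ne k 0 (by omega) (by omega), pvCnt_succ_ne k 4 (by omega) (by omega), pvCnt_succ_ne k 2 (by omega) (by omega),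
             pvCnt_succ_ne k 6 (by omega) (by omega), pvCnt_succ_ne k 1 (by omega) (by omega), pvCnt_succ_ne k 5 (by omega) (by omega),
             pvCnt_succ_ne k 3 (by omega) (by omega), pvCnt_succ_self k 7 (by omega) hr]] <;>
      omega

lemma pvIndex_replicate_self (c : Nat) (hc : 0 < c) (v : Int) (t : List Int) :
    PySem.List.index? (List.replicate c v ++ t) v = some 0 := by
  cases c with
  | zero => omega
  | succ n => rw [List.replicate_succ, List.cons_append, PySem.List.index?_cons_self]

lemma pvIndex_block (pre : List Int) (c : Nat) (hc : 0 < c) (v : Int) (t : List Int) :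
    v ∉ pre → PySem.List.index? (pre ++ (List.replicate c v ++ t)) v = some pre.length := by
  induction pre with
  | nil => intro _; simpa using pvIndex_replicate_self c hc v t
  | cons x xs ih =>
      intro hv
      have hx : x ≠ v := fun h => hv (by simp [h])
      rw [List.cons_append, PySem.List.index?_cons_of_ne _ hx,
        ih (fun h => hv (List.mem_cons_of_mem _ h))]
      simp

lemma pvInsert_block (pre : List Int) (c : Nat) (v : Int) (t : List Int)
    (hv : v ∉ pre) (hc : 0 < c) :
    PySem.List.insert (pre ++ (List.replicate c v ++ t))
      ((((PySem.List.index? (pre ++ (List.replicate c v ++ t)) v).getD 0 : Nat) : Int)) v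
      = pre ++ (List.replicate (c + 1) v ++ t) := by
  rw [pvIndex_block pre c hc v t hv]
  simp only [Option.getD_some]
  rw [PySem.List.insert_natCast _ _ _ (by simp)]
  rw [List.take_left, List.drop_left]
  simp [List.replicate_succ]

lemma pvCase (k : Nat) (pre t : List Int) (v : Int) (r : Nat)
    (he : pvModel k = pre ++ (List.replicate (pvCnt k r) v ++ t))
    (he' : pvModel (k + 1) = pre ++ (List.replicate (pvCnt k r + 1) v ++ t))
    (hv : v ∉ pre) :
    PySem.List.insert (pvModel k) (((PySem.List.index? (pvModel k) v).getD 0 : Nat) : Int) v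
      = pvModel (k + 1) := by
  rw [he, he']
  exact pvInsert_block pre _ v t hv (by unfold pvCnt; omega)

lemma pvStep (k : Nat) :
    PySem.List.insert (pvModel k)
      (((PySem.List.index? (pvModel k)
          ((PySem.List.pyGet? pvDupOrder ((k % pvDupOrder.length : Nat) : Int)).getD 0)).getD 0 : Nat) : Int)
      ((PySem.List.pyGet? pvDupOrder ((k % pvDupOrder.length : Nat) : Int)).getD 0)
      = pvModel (k + 1) := by
  rcases (by omega : k % 8 = 0 ∨ k % 8 = 1 ∨ k % 8 = 2 ∨ k % 8 = 3 ∨ k % 8 = 4 ∨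
      k % 8 = 5 ∨ k % 8 = 6 ∨ k % 8 = 7) with hr | hr | hr | hr | hr | hr | hr | hr
  · have hval : (PySem.List.pyGet? pvDupOrder ((k % pvDupOrder.length : Nat) : Int)).getD 0 = (4 : Int) := by
      norm_num [pvDupOrder, hr, PySem.List.pyGet?, PySem.List.pyIdx?]
    rw [hval]
    have c0 : pvCnt (k + 1) 0 = pvCnt k 0 + 1 := pvCnt_succ_self k 0 (by omega) (by omega)
    have c4 : pvCnt (k + 1) 4 = pvCnt k 4 := pvCnt_succ_ne k 4 (by omega) (by omega)
    have c2 : pvCnt (k + 1) 2 = pvCnt k 2 := pvCnt_succ_ne k 2 (by omega) (by omega)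
    have c6 : pvCnt (k + 1) 6 = pvCnt k 6 := pvCnt_succ_ne k 6 (by omega) (by omega)
    have c1 : pvCnt (k + 1) 1 = pvCnt k 1 := pvCnt_succ_ne k 1 (by omega) (by omega)
    have c5 : pvCnt (k + 1) 5 = pvCnt k 5 := pvCnt_succ_ne k 5 (by omega) (by omega)
    have c3 : pvCnt (k + 1) 3 = pvCnt k 3 := pvCnt_succ_ne k 3 (by omega) (by omega)
    have c7 : pvCnt (k + 1) 7 = pvCnt k 7 := pvCnt_succ_ne k 7 (by omega) (by omega)
    exact pvCase k (([] : List Int)) (List.replicate (pvCnt k 4) 5 ++ List.replicate (pvCnt k 2) 6 ++ List.replicate (pvCnt k 6) 7 ++ List.replicate (pvCnt k 1) 0 ++ List.replicate (pvCnt k 5) 1 ++ List.replicate (pvCnt k 3) 2 ++ List.replicate (pvCnt k 7) 3) 4 0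
      (by simp [pvModel, List.append_assoc])
      (by simp [pvModel, c0, c4, c2, c6, c1, c5, c3, c7, List.append_assoc])
      (by simp)
  · have hval : (PySem.List.pyGet? pvDupOrder ((k % pvDupOrder.length : Nat) : Int)).getD 0 = (0 : Int) := by
      norm_num [pvDupOrder, hr, PySem.List.pyGet?, PySem.List.pyIdx?]
    rw [hval]
    have c0 : pvCnt (k + 1) 0 = pvCnt k 0 := pvCnt_succ_ne k 0 (by omega) (by omega)
    have c4 : pvCnt (k + 1) 4 = pvCnt k 4 := pvCnt_succ_ne k 4 (by omega) (by omega)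
    have c2 : pvCnt (k + 1) 2 = pvCnt k 2 := pvCnt_succ_ne k 2 (by omega) (by omega)
    have c6 : pvCnt (k + 1) 6 = pvCnt k 6 := pvCnt_succ_ne k 6 (by omega) (by omega)
    have c1 : pvCnt (k + 1) 1 = pvCnt k 1 + 1 := pvCnt_succ_self k 1 (by omega) (by omega)
    have c5 : pvCnt (k + 1) 5 = pvCnt k 5 := pvCnt_succ_ne k 5 (by omega) (by omega)
    have c3 : pvCnt (k + 1) 3 = pvCnt k 3 := pvCnt_succ_ne k 3 (by omega) (by omega)
    have c7 : pvCnt (k + 1) 7 = pvCnt k 7 := pvCnt_succ_ne k 7 (by omega) (by omega)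
    exact pvCase k (List.replicate (pvCnt k 0) 4 ++ List.replicate (pvCnt k 4) 5 ++ List.replicate (pvCnt k 2) 6 ++ List.replicate (pvCnt k 6) 7) (List.replicate (pvCnt k 5) 1 ++ List.replicate (pvCnt k 3) 2 ++ List.replicate (pvCnt k 7) 3) 0 1
      (by simp [pvModel, List.append_assoc])
      (by simp [pvModel, c0, c4, c2, c6, c1, c5, c3, c7, List.append_assoc])
      (by simp [List.mem_replicate])
  · have hval : (PySem.List.pyGet? pvDupOrder ((k % pvDupOrder.length : Nat) : Int)).getD 0 = (6 : Int) := by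
      norm_num [pvDupOrder, hr, PySem.List.pyGet?, PySem.List.pyIdx?]
      all_goals decide
    rw [hval]
    have c0 : pvCnt (k + 1) 0 = pvCnt k 0 := pvCnt_succ_ne k 0 (by omega) (by omega)
    have c4 : pvCnt (k + 1) 4 = pvCnt k 4 := pvCnt_succ_ne k 4 (by omega) (by omega)
    have c2 : pvCnt (k + 1) 2 = pvCnt k 2 + 1 := pvCnt_succ_self k 2 (by omega) (by omega)
    have c6 : pvCnt (k + 1) 6 = pvCnt k 6 := pvCnt_succ_ne k 6 (by omega) (by omega)
    have c1 : pvCnt (k + 1) 1 = pvCnt k 1 := pvCnt_succ_ne k 1 (by omega) (by omega)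
    have c5 : pvCnt (k + 1) 5 = pvCnt k 5 := pvCnt_succ_ne k 5 (by omega) (by omega)
    have c3 : pvCnt (k + 1) 3 = pvCnt k 3 := pvCnt_succ_ne k 3 (by omega) (by omega)
    have c7 : pvCnt (k + 1) 7 = pvCnt k 7 := pvCnt_succ_ne k 7 (by omega) (by omega)
    exact pvCase k (List.replicate (pvCnt k 0) 4 ++ List.replicate (pvCnt k 4) 5) (List.replicate (pvCnt k 6) 7 ++ List.replicate (pvCnt k 1) 0 ++ List.replicate (pvCnt k 5) 1 ++ List.replicate (pvCnt k 3) 2 ++ List.replicate (pvCnt k 7) 3) 6 2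
      (by simp [pvModel, List.append_assoc])
      (by simp [pvModel, c0, c4, c2, c6, c1, c5, c3, c7, List.append_assoc])
      (by simp [List.mem_replicate])
  · have hval : (PySem.List.pyGet? pvDupOrder ((k % pvDupOrder.length : Nat) : Int)).getD 0 = (2 : Int) := by
      norm_num [pvDupOrder, hr, PySem.List.pyGet?, PySem.List.pyIdx?]
      all_goals decide
    rw [hval]
    have c0 : pvCnt (k + 1) 0 = pvCnt k 0 := pvCnt_succ_ne k 0 (by omega) (by omega)
    have c4 : pvCnt (k + 1) 4 = pvCnt k 4 := pvCnt_succ_ne k 4 (by omega) (by omega)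
    have c2 : pvCnt (k + 1) 2 = pvCnt k 2 := pvCnt_succ_ne k 2 (by omega) (by omega)
    have c6 : pvCnt (k + 1) 6 = pvCnt k 6 := pvCnt_succ_ne k 6 (by omega) (by omega)
    have c1 : pvCnt (k + 1) 1 = pvCnt k 1 := pvCnt_succ_ne k 1 (by omega) (by omega)
    have c5 : pvCnt (k + 1) 5 = pvCnt k 5 := pvCnt_succ_ne k 5 (by omega) (by omega)
    have c3 : pvCnt (k + 1) 3 = pvCnt k 3 + 1 := pvCnt_succ_self k 3 (by omega) (by omega)
    have c7 : pvCnt (k + 1) 7 = pvCnt k 7 := pvCnt_succ_ne k 7 (by omega) (by omega)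
    exact pvCase k (List.replicate (pvCnt k 0) 4 ++ List.replicate (pvCnt k 4) 5 ++ List.replicate (pvCnt k 2) 6 ++ List.replicate (pvCnt k 6) 7 ++ List.replicate (pvCnt k 1) 0 ++ List.replicate (pvCnt k 5) 1) (List.replicate (pvCnt k 7) 3) 2 3
      (by simp [pvModel, List.append_assoc])
      (by simp [pvModel, c0, c4, c2, c6, c1, c5, c3, c7, List.append_assoc])
      (by simp [List.mem_replicate])
  · have hval : (PySem.List.pyGet? pvDupOrder ((k % pvDupOrder.length : Nat) : Int)).getD 0 = (5 : Int) := by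
      norm_num [pvDupOrder, hr, PySem.List.pyGet?, PySem.List.pyIdx?]
      all_goals decide
    rw [hval]
    have c0 : pvCnt (k + 1) 0 = pvCnt k 0 := pvCnt_succ_ne k 0 (by omega) (by omega)
    have c4 : pvCnt (k + 1) 4 = pvCnt k 4 + 1 := pvCnt_succ_self k 4 (by omega) (by omega)
    have c2 : pvCnt (k + 1) 2 = pvCnt k 2 := pvCnt_succ_ne k 2 (by omega) (by omega)
    have c6 : pvCnt (k + 1) 6 = pvCnt k 6 := pvCnt_succ_ne k 6 (by omega) (by omega)
    have c1 : pvCnt (k + 1) 1 = pvCnt k 1 := pvCnt_succ_ne k 1 (by omega) (by omega)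
    have c5 : pvCnt (k + 1) 5 = pvCnt k 5 := pvCnt_succ_ne k 5 (by omega) (by omega)
    have c3 : pvCnt (k + 1) 3 = pvCnt k 3 := pvCnt_succ_ne k 3 (by omega) (by omega)
    have c7 : pvCnt (k + 1) 7 = pvCnt k 7 := pvCnt_succ_ne k 7 (by omega) (by omega)
    exact pvCase k (List.replicate (pvCnt k 0) 4) (List.replicate (pvCnt k 2) 6 ++ List.replicate (pvCnt k 6) 7 ++ List.replicate (pvCnt k 1) 0 ++ List.replicate (pvCnt k 5) 1 ++ List.replicate (pvCnt k 3) 2 ++ List.replicate (pvCnt k 7) 3) 5 4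
      (by simp [pvModel, List.append_assoc])
      (by simp [pvModel, c0, c4, c2, c6, c1, c5, c3, c7, List.append_assoc])
      (by simp [List.mem_replicate])
  · have hval : (PySem.List.pyGet? pvDupOrder ((k % pvDupOrder.length : Nat) : Int)).getD 0 = (1 : Int) := by
      norm_num [pvDupOrder, hr, PySem.List.pyGet?, PySem.List.pyIdx?]
      all_goals decide
    rw [hval]
    have c0 : pvCnt (k + 1) 0 = pvCnt k 0 := pvCnt_succ_ne k 0 (by omega) (by omega)
    have c4 : pvCnt (k + 1) 4 = pvCnt k 4 := pvCnt_succ_ne k 4 (by omega) (by omega)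
    have c2 : pvCnt (k + 1) 2 = pvCnt k 2 := pvCnt_succ_ne k 2 (by omega) (by omega)
    have c6 : pvCnt (k + 1) 6 = pvCnt k 6 := pvCnt_succ_ne k 6 (by omega) (by omega)
    have c1 : pvCnt (k + 1) 1 = pvCnt k 1 := pvCnt_succ_ne k 1 (by omega) (by omega)
    have c5 : pvCnt (k + 1) 5 = pvCnt k 5 + 1 := pvCnt_succ_self k 5 (by omega) (by omega)
    have c3 : pvCnt (k + 1) 3 = pvCnt k 3 := pvCnt_succ_ne k 3 (by omega) (by omega)
    have c7 : pvCnt (k + 1) 7 = pvCnt k 7 := pvCnt_succ_ne k 7 (by omega) (by omega)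
    exact pvCase k (List.replicate (pvCnt k 0) 4 ++ List.replicate (pvCnt k 4) 5 ++ List.replicate (pvCnt k 2) 6 ++ List.replicate (pvCnt k 6) 7 ++ List.replicate (pvCnt k 1) 0) (List.replicate (pvCnt k 3) 2 ++ List.replicate (pvCnt k 7) 3) 1 5
      (by simp [pvModel, List.append_assoc])
      (by simp [pvModel, c0, c4, c2, c6, c1, c5, c3, c7, List.append_assoc])
      (by simp [List.mem_replicate])
  · have hval : (PySem.List.pyGet? pvDupOrder ((k % pvDupOrder.length : Nat) : Int)).getD 0 = (7 : Int) := by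
      norm_num [pvDupOrder, hr, PySem.List.pyGet?, PySem.List.pyIdx?]
      all_goals decide
    rw [hval]
    have c0 : pvCnt (k + 1) 0 = pvCnt k 0 := pvCnt_succ_ne k 0 (by omega) (by omega)
    have c4 : pvCnt (k + 1) 4 = pvCnt k 4 := pvCnt_succ_ne k 4 (by omega) (by omega)
    have c2 : pvCnt (k + 1) 2 = pvCnt k 2 := pvCnt_succ_ne k 2 (by omega) (by omega)
    have c6 : pvCnt (k + 1) 6 = pvCnt k 6 + 1 := pvCnt_succ_self k 6 (by omega) (by omega)
    have c1 : pvCnt (k + 1) 1 = pvCnt k 1 := pvCnt_succ_ne k 1 (by omega) (by omega)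
    have c5 : pvCnt (k + 1) 5 = pvCnt k 5 := pvCnt_succ_ne k 5 (by omega) (by omega)
    have c3 : pvCnt (k + 1) 3 = pvCnt k 3 := pvCnt_succ_ne k 3 (by omega) (by omega)
    have c7 : pvCnt (k + 1) 7 = pvCnt k 7 := pvCnt_succ_ne k 7 (by omega) (by omega)
    exact pvCase k (List.replicate (pvCnt k 0) 4 ++ List.replicate (pvCnt k 4) 5 ++ List.replicate (pvCnt k 2) 6) (List.replicate (pvCnt k 1) 0 ++ List.replicate (pvCnt k 5) 1 ++ List.replicate (pvCnt k 3) 2 ++ List.replicate (pvCnt k 7) 3) 7 6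
      (by simp [pvModel, List.append_assoc])
      (by simp [pvModel, c0, c4, c2, c6, c1, c5, c3, c7, List.append_assoc])
      (by simp [List.mem_replicate])
  · have hval : (PySem.List.pyGet? pvDupOrder ((k % pvDupOrder.length : Nat) : Int)).getD 0 = (3 : Int) := by
      norm_num [pvDupOrder, hr, PySem.List.pyGet?, PySem.List.pyIdx?]
      all_goals decide
    rw [hval]
    have c0 : pvCnt (k + 1) 0 = pvCnt k 0 := pvCnt_succ_ne k 0 (by omega) (by omega)
    have c4 : pvCnt (k + 1) 4 = pvCnt k 4 := pvCnt_succ_ne k 4 (by omega) (by omega)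
    have c2 : pvCnt (k + 1) 2 = pvCnt k 2 := pvCnt_succ_ne k 2 (by omega) (by omega)
    have c6 : pvCnt (k + 1) 6 = pvCnt k 6 := pvCnt_succ_ne k 6 (by omega) (by omega)
    have c1 : pvCnt (k + 1) 1 = pvCnt k 1 := pvCnt_succ_ne k 1 (by omega) (by omega)
    have c5 : pvCnt (k + 1) 5 = pvCnt k 5 := pvCnt_succ_ne k 5 (by omega) (by omega)
    have c3 : pvCnt (k + 1) 3 = pvCnt k 3 := pvCnt_succ_ne k 3 (by omega) (by omega)
    have c7 : pvCnt (k + 1) 7 = pvCnt k 7 + 1 := pvCnt_succ_self k 7 (by omega) (by omega)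
    exact pvCase k (List.replicate (pvCnt k 0) 4 ++ List.replicate (pvCnt k 4) 5 ++ List.replicate (pvCnt k 2) 6 ++ List.replicate (pvCnt k 6) 7 ++ List.replicate (pvCnt k 1) 0 ++ List.replicate (pvCnt k 5) 1 ++ List.replicate (pvCnt k 3) 2) (([] : List Int)) 3 7
      (by simp [pvModel, List.append_assoc])
      (by simp [pvModel, c0, c4, c2, c6, c1, c5, c3, c7, List.append_assoc])
      (by simp [List.mem_replicate])

lemma pvALoop_model (length : Int) (n : Nat) (hl : length = 8 + (n : Int)) :
    ∀ d k, k + d = n → pvALoop length (pvModel k) k = pvModel n := by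
  intro d
  induction d with
  | zero =>
      intro k hk
      have hk' : k = n := by omega
      subst hk'
      rw [pvALoop, dif_neg (by rw [pvModel_length]; push_cast; omega)]
  | succ d ih =>
      intro k hk
      rw [pvALoop, dif_pos (by rw [pvModel_length]; push_cast; omega)]
      rw [pvStep k]
      exact ih (k + 1) (by omega)

lemma pvRun (length : Int) (n : Nat) (hl : length = 8 + (n : Int)) (j : Int) (jn : Nat)
    (hj : j = (jn : Int)) (hjn : jn ≤ 7) (v : Int) :
    PySem.List.pyRepeat [v] (1 + PySem.Int.floordiv (length - 8 + 7 - j) 8)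
      = List.replicate (pvCnt n jn) v := by
  subst hj hl
  rw [PySem.List.pyRepeat_singleton, PySem.Int.floordiv_eq_ediv_of_pos (by norm_num)]
  congr 1
  unfold pvCnt
  omega

-- ===== VERDICT (by name: the statement is the Claim_ definition above) =====
theorem generate_circle_sequence_spec : Claim_equal_generate_circle_sequence := by
  intro length _ _
  unfold Spec_generate_circle_sequence generate_circle_sequence generate_circle_sequence_alt
  by_cases h : length ≤ 8
  · rw [if_pos h, if_pos h]
    rfl
  · rw [if_neg h, if_neg h]
    obtain ⟨n, hn⟩ : ∃ n : Nat, length = 8 + (n : Int) := ⟨(length - 8).toNat, by omega⟩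
    have hbase : (PySem.List.pyGet? pvBaseSeq 5).getD ([] : List Int) = pvModel 0 := by decide
    rw [hbase, pvALoop_model length n hn n 0 (by omega)]
    have hp4 : pvDupPos.getD 4 0 = (0 : Int) := by decide
    have hp5 : pvDupPos.getD 5 0 = (4 : Int) := by decide
    have hp6 : pvDupPos.getD 6 0 = (2 : Int) := by decide
    have hp7 : pvDupPos.getD 7 0 = (6 : Int) := by decide
    have hp0 : pvDupPos.getD 0 0 = (1 : Int) := by decide
    have hp1 : pvDupPos.getD 1 0 = (5 : Int) := by decide
    have hp2 : pvDupPos.getD 2 0 = (3 : Int) := by decide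
    have hp3 : pvDupPos.getD 3 0 = (7 : Int) := by decide
    simp only [List.foldl_cons, List.foldl_nil, hp0, hp1, hp2, hp3, hp4, hp5, hp6, hp7]
    rw [pvRun length n hn 0 0 (by norm_num) (by norm_num) 4,
        pvRun length n hn 4 4 (by norm_num) (by norm_num) 5,
        pvRun length n hn 2 2 (by norm_num) (by norm_num) 6,
        pvRun length n hn 6 6 (by norm_num) (by norm_num) 7,
        pvRun length n hn 1 1 (by norm_num) (by norm_num) 0,
        pvRun length n hn 5 5 (by norm_num) (by norm_num) 1,
        pvRun length n hn 3 3 (by norm_num) (by norm_num) 2,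
        pvRun length n hn 7 7 (by norm_num) (by norm_num) 3]
    rw [PySem.List.slice_to (pvModel n) (by omega : (0 : Int) ≤ length)]
    rw [List.take_of_length_le (by rw [pvModel_length]; omega)]
    simp [pvModel, List.append_assoc]
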